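-- pv_equiv track=rewrite | github.com/381706-2BandenkovD/bioInf | Implement LeaderboardCyclopeptideSequencing.py | cScore
-- ===== SOURCE A (Python) =====
-- def cycSpec(peptide):
-- 	spec = [0]
-- 	for x in range(1,len(peptide)):
-- 		for i in range(len(peptide)):
-- 			if i+x >= len(peptide):
-- 				y = i+x-len(peptide)
-- 				spec.append(sum(peptide[i:])+sum(peptide[:y]))
-- 			else:
-- 				spec.append(sum(peptide[i:i+x]))
-- 	spec.append(sum(peptide))
-- 	spec.sort()
-- 	return spec
--
-- def cScore(peptide, spectrum):
-- 	spec = cycSpec(peptide)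
-- 	score = 0
-- 	i = 0
-- 	for x in spectrum:
-- 		for y in range(i,len(spec)):
-- 			if x == spec[y]:
-- 				score +=1
-- 				i = y+1
-- 				break
-- 	return score
-- ===== SOURCE B (Python) =====
-- def cScore(peptide, spectrum):
--     n = len(peptide)
--     pre = [0] * (n + 1)
--     for k in range(n):
--         pre[k + 1] = pre[k] + peptide[k]
--     total = pre[n]
--     spec = [0]
--     for x in range(1, n):
--         for i in range(n):
--             j = i + x
--             if j >= n:
--                 spec.append(total - pre[i] + pre[j - n])
--             else:
--                 spec.append(pre[j] - pre[i])
--     spec.append(total)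
--     spec.sort()
--     score = 0
--     lo = 0
--     m = len(spec)
--     for v in spectrum:
--         a, b = lo, m
--         while a < b:
--             mid = (a + b) // 2
--             if spec[mid] < v:
--                 a = mid + 1
--             else:
--                 b = mid
--         if a < m and spec[a] == v:
--             score += 1
--             lo = a + 1
--     return score
-- ===== Notes on version B (the rewrite author's own statement) =====
-- stated objective: faster
-- what changed: B builds the cyclic spectrum from a prefix-sum array (O(1) per subpeptide mass instead of re-summing slices) and scores by binary-searching the sorted spectrum from the moving pointer instead of A's linear rescan.
import Mathlib
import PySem

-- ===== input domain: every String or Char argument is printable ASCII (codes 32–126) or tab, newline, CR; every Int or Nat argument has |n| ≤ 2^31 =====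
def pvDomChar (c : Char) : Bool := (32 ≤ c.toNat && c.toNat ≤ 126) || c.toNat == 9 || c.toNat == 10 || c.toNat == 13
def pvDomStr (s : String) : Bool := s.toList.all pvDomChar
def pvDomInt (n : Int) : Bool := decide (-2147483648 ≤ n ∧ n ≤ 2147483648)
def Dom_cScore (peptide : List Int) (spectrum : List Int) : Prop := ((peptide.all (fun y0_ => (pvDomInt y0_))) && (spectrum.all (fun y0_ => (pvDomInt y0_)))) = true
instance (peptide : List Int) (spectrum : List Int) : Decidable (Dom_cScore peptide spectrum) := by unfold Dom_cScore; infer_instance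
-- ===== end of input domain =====

-- B replaces A's repeated slice summation by a prefix-sum array and A's linear
-- rescans of the sorted spectrum by binary search (objective: faster).

-- ===== PORT A =====

-- A's cycSpec: nested loops appending slice sums, then sort.
def cycSpec (peptide : List Int) : List Int :=
  let n : Int := (peptide.length : Int)
  let spec :=
    (PySem.List.pyRange 1 n 1).foldl (fun spec x =>
      (PySem.List.pyRange 0 n 1).foldl (fun spec i =>
        if i + x ≥ n then
          let y := i + x - n
          spec ++ [(PySem.List.slice peptide (some i) none).sum
                    + (PySem.List.slice peptide none (some y)).sum]
        else
          spec ++ [(PySem.List.slice peptide (some i) (some (i + x))).sum]) spec) [0]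
  PySem.List.sorted (spec ++ [peptide.sum]) (fun z => z) false

-- A's inner 'for y in range(i, len(spec)): if x == spec[y]: …; break' as a scan
-- returning the first matching index (none = loop fell through).
def findA (spec : List Int) (x : Int) (y : Nat) : Option Nat :=
  if y < spec.length then
    (if x = spec.getD y 0 then some y else findA spec x (y + 1))
  else none
termination_by spec.length - y

def cScore (peptide : List Int) (spectrum : List Int) : Int :=
  let spec := cycSpec peptide
  (spectrum.foldl (fun (st : Int × Nat) x =>
      match findA spec x st.2 with
      | some y => (st.1 + 1, y + 1)
      | none => st) (0, 0)).1

-- ===== PORT B =====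

-- Source B's prefix-sum array pre (pre[k] = sum of the first k masses).
def prefixSums (acc : Int) : List Int → List Int
  | [] => [acc]
  | a :: t => acc :: prefixSums (acc + a) t

-- Source B's hand-written lower-bound binary search ('while a < b: …').
def lowerB (spec : List Int) (v : Int) (a b : Nat) : Nat :=
  if a < b then
    let mid := (a + b) / 2
    if spec.getD mid 0 < v then lowerB spec v (mid + 1) b else lowerB spec v a mid
  else a
termination_by b - a
decreasing_by all_goals omega

def cScore_alt (peptide : List Int) (spectrum : List Int) : Int :=
  let n := peptide.length
  let pre := prefixSums 0 peptide
  let total := pre.getD n 0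
  let spec :=
    (PySem.List.pyRange 1 (n : Int) 1).foldl (fun spec x =>
      (PySem.List.pyRange 0 (n : Int) 1).foldl (fun spec i =>
        let j := i + x
        if j ≥ (n : Int) then
          spec ++ [total - PySem.List.pyGetD pre i 0 + PySem.List.pyGetD pre (j - n) 0]
        else
          spec ++ [PySem.List.pyGetD pre j 0 - PySem.List.pyGetD pre i 0]) spec) [0]
  let spec := PySem.List.sorted (spec ++ [total]) (fun z => z) false
  let m := spec.length
  (spectrum.foldl (fun (st : Int × Nat) v =>
      let a := lowerB spec v st.2 m
      if a < m ∧ spec.getD a 0 = v then (st.1 + 1, a + 1) else st) (0, 0)).1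

-- ===== PRECONDITION & SPEC =====
def Spec_cScore (peptide : List Int) (spectrum : List Int) (out : Int) : Prop := out = cScore_alt peptide spectrum
instance (peptide : List Int) (spectrum : List Int) (out : Int) : Decidable (Spec_cScore peptide spectrum out) := by unfold Spec_cScore; infer_instance

-- ===== CLAIM (what is proved, stated in full; the proofs are below) =====
def Claim_equal_cScore : Prop := ∀ (peptide : List Int) (spectrum : List Int), Dom_cScore peptide spectrum → Spec_cScore peptide spectrum (cScore peptide spectrum)

-- ===== LEMMAS AND PROOFS =====

-- pre[k] is the sum of the first k elements.
theorem prefixSums_getD (l : List Int) : ∀ (acc : Int) (k : Nat),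
    (prefixSums acc l).getD k 0 = acc + (l.take k).sum ∨ l.length < k := by
  induction l with
  | nil =>
    intro acc k
    cases k with
    | zero => left; simp [prefixSums]
    | succ k => right; simp
  | cons a t ih =>
    intro acc k
    cases k with
    | zero => left; simp [prefixSums]
    | succ k =>
      rcases ih (acc + a) k with h | h
      · left
        have e : (prefixSums acc (a :: t)).getD (k+1) 0 = (prefixSums (acc+a) t).getD k 0 := by
          simp [prefixSums]
        rw [e, h, List.take_succ_cons, List.sum_cons]; ring
      · right; simpa using h

theorem prefixSums_getD_of_le (l : List Int) (acc : Int) (k : Nat) (hk : k ≤ l.length) :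
    (prefixSums acc l).getD k 0 = acc + (l.take k).sum := by
  rcases prefixSums_getD l acc k with h | h
  · exact h
  · omega

-- sum of a middle slice via two prefix sums
theorem sum_drop_take (l : List Int) (a b : Nat) (hab : a ≤ b) :
    ((l.drop a).take (b - a)).sum = (l.take b).sum - (l.take a).sum := by
  have h : l.take b = l.take a ++ (l.drop a).take (b - a) := by
    rw [← List.take_add]; congr 1; omega
  rw [h, List.sum_append]; ring

theorem sum_drop (l : List Int) (a : Nat) :
    (l.drop a).sum = l.sum - (l.take a).sum := by
  have h := congrArg List.sum (List.take_append_drop a l)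
  rw [List.sum_append] at h
  omega

theorem prefixSums_length (l : List Int) : ∀ (acc : Int), (prefixSums acc l).length = l.length + 1 := by
  induction l with
  | nil => intro acc; rfl
  | cons a t ih => intro acc; simp [prefixSums, ih]

-- pre[i] (Python indexing) is the sum of the first i masses
theorem pre_get (l : List Int) (i : Int) (h0 : 0 ≤ i) (h1 : i ≤ (l.length : Int)) :
    PySem.List.pyGetD (prefixSums 0 l) i 0 = (l.take i.toNat).sum := by
  have hlt : i < ((prefixSums 0 l).length : Int) := by rw [prefixSums_length]; push_cast; omega
  rw [PySem.List.pyGetD_eq_getElem _ _ h0 hlt,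
      ← List.getD_eq_getElem _ _ (by rw [prefixSums_length]; omega),
      prefixSums_getD_of_le l 0 i.toNat (by omega), zero_add]

-- the unsorted spectra built by the two ports coincide (so their sorts do too)
theorem cycSpec_eq (peptide : List Int) :
    cycSpec peptide
      = PySem.List.sorted
          (((PySem.List.pyRange 1 ((peptide.length : Int)) 1).foldl (fun spec x =>
              (PySem.List.pyRange 0 ((peptide.length : Int)) 1).foldl (fun spec i =>
                let j := i + x
                if j ≥ (peptide.length : Int) then
                  spec ++ [(prefixSums 0 peptide).getD peptide.length 0
                            - PySem.List.pyGetD (prefixSums 0 peptide) i 0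
                            + PySem.List.pyGetD (prefixSums 0 peptide) (j - (peptide.length : Int)) 0]
                else
                  spec ++ [PySem.List.pyGetD (prefixSums 0 peptide) j 0
                            - PySem.List.pyGetD (prefixSums 0 peptide) i 0]) spec) [0])
            ++ [(prefixSums 0 peptide).getD peptide.length 0]) (fun z => z) false := by
  have htot : (prefixSums 0 peptide).getD peptide.length 0 = peptide.sum := by
    rw [prefixSums_getD_of_le _ _ _ le_rfl, List.take_length, zero_add]
  unfold cycSpec
  rw [htot]
  refine congrArg (fun L => PySem.List.sorted (L ++ [peptide.sum]) (fun z => z) false) ?_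
  apply PySem.List.foldl_congr_mem
  intro acc x hx
  rw [PySem.List.mem_pyRange_one] at hx
  apply PySem.List.foldl_congr_mem
  intro acc2 i hi
  rw [PySem.List.mem_pyRange_one] at hi
  dsimp only
  by_cases hc : i + x ≥ (peptide.length : Int)
  · rw [if_pos hc, if_pos hc]
    refine congrArg (fun z => acc2 ++ [z]) ?_
    rw [PySem.List.slice_from peptide hi.1,
        PySem.List.slice_to peptide (show (0:Int) ≤ i + x - (peptide.length : Int) by omega),
        pre_get peptide i hi.1 (by omega),
        pre_get peptide (i + x - (peptide.length : Int)) (by omega) (by omega),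
        sum_drop peptide i.toNat]
  · rw [if_neg hc, if_neg hc]
    refine congrArg (fun z => acc2 ++ [z]) ?_
    rw [PySem.List.slice_toNat peptide (show (0:Int) ≤ i by exact hi.1) (show (0:Int) ≤ i + x by omega),
        sum_drop_take peptide i.toNat (i + x).toNat (by omega),
        pre_get peptide (i + x) (by omega) (by omega),
        pre_get peptide i hi.1 (by omega)]

-- findA finds the first match at or after y
theorem findA_eq_some (spec : List Int) (v : Int) :
    ∀ (r : Nat) (d i : Nat), r - i ≤ d → i ≤ r → r < spec.length → spec.getD r 0 = v →
    (∀ k, i ≤ k → k < r → spec.getD k 0 ≠ v) → findA spec v i = some r := by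
  intro r d
  induction d with
  | zero =>
    intro i h0 h1 h2 h3 h4
    have hir : i = r := by omega
    subst hir
    rw [findA, if_pos h2, if_pos h3.symm]
  | succ d ih =>
    intro i h0 h1 h2 h3 h4
    by_cases hir : i = r
    · subst hir
      rw [findA, if_pos h2, if_pos h3.symm]
    · have hi : i < r := by omega
      have hlen : i < spec.length := by omega
      have hne : ¬ v = spec.getD i 0 := fun he => h4 i le_rfl hi he.symm
      rw [findA]
      rw [if_pos hlen, if_neg hne]
      exact ih (i + 1) (by omega) (by omega) h2 h3 (fun k hk1 hk2 => h4 k (by omega) hk2)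

theorem findA_eq_none (spec : List Int) (v : Int) :
    ∀ (d i : Nat), spec.length - i ≤ d →
      (∀ k, i ≤ k → k < spec.length → spec.getD k 0 ≠ v) → findA spec v i = none := by
  intro d
  induction d with
  | zero =>
    intro i h0 h1
    rw [findA]
    simp [show ¬ i < spec.length by omega]
  | succ d ih =>
    intro i h0 h1
    by_cases hlen : i < spec.length
    · have hne : ¬ v = spec.getD i 0 := fun he => h1 i le_rfl hlen he.symm
      rw [findA]
      rw [if_pos hlen, if_neg hne]
      exact ih (i + 1) (by omega) (fun k hk1 hk2 => h1 k (by omega) hk2)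
    · rw [findA]
      simp [hlen]

-- invariant of Source B's binary search (on a sorted list)
theorem lowerB_inv (spec : List Int) (v : Int)
    (hmono : ∀ p q : Nat, p ≤ q → q < spec.length → spec.getD p 0 ≤ spec.getD q 0) :
    ∀ (d a b : Nat), b - a ≤ d → a ≤ b → b ≤ spec.length →
      a ≤ lowerB spec v a b ∧ lowerB spec v a b ≤ b ∧
      (∀ k, a ≤ k → k < lowerB spec v a b → spec.getD k 0 < v) ∧
      (lowerB spec v a b < b → ¬ spec.getD (lowerB spec v a b) 0 < v) := by
  intro d
  induction d with
  | zero =>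
    intro a b hd hab hb
    have hres : lowerB spec v a b = a := by
      rw [lowerB, if_neg (by omega)]
    rw [hres]
    exact ⟨le_rfl, hab, fun k h1 h2 => absurd h2 (by omega), fun h => absurd h (by omega)⟩
  | succ d ih =>
    intro a b hd hab hb
    by_cases hab' : a < b
    · rw [lowerB, if_pos hab']
      simp only []
      by_cases hv : spec.getD ((a + b) / 2) 0 < v
      · rw [if_pos hv]
        have hmid1 : a ≤ (a + b) / 2 := by omega
        have hmid2 : (a + b) / 2 < b := by omega
        obtain ⟨h1, h2, h3, h4⟩ := ih ((a + b) / 2 + 1) b (by omega) (by omega) hb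
        refine ⟨by omega, h2, ?_, h4⟩
        intro k hk1 hk2
        by_cases hkm : k ≤ (a + b) / 2
        · exact lt_of_le_of_lt (hmono k ((a + b) / 2) hkm (by omega)) hv
        · exact h3 k (by omega) hk2
      · rw [if_neg hv]
        have hmid2 : (a + b) / 2 < b := by omega
        obtain ⟨h1, h2, h3, h4⟩ := ih a ((a + b) / 2) (by omega) (by omega) (by omega)
        refine ⟨h1, by omega, h3, ?_⟩
        intro hr
        by_cases hrm : lowerB spec v a ((a + b) / 2) < (a + b) / 2
        · exact h4 hrm
        · have : lowerB spec v a ((a + b) / 2) = (a + b) / 2 := by omega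
          rw [this]
          exact hv
    · have hres : lowerB spec v a b = a := by
        rw [lowerB, if_neg hab']
      rw [hres]
      exact ⟨le_rfl, hab, fun k h1 h2 => absurd h2 (by omega), fun h => absurd h (by omega)⟩

-- on a sorted list, Source B's binary-search probe returns exactly A's first linear match
theorem step_eq (spec : List Int) (v : Int)
    (hmono : ∀ p q : Nat, p ≤ q → q < spec.length → spec.getD p 0 ≤ spec.getD q 0)
    (i : Nat) (hi : i ≤ spec.length) :
    findA spec v i
      = (if lowerB spec v i spec.length < spec.length ∧
            spec.getD (lowerB spec v i spec.length) 0 = v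
         then some (lowerB spec v i spec.length) else none) := by
  obtain ⟨h1, h2, h3, h4⟩ :=
    lowerB_inv spec v hmono (spec.length - i) i spec.length le_rfl hi le_rfl
  by_cases hc : lowerB spec v i spec.length < spec.length ∧
      spec.getD (lowerB spec v i spec.length) 0 = v
  · rw [if_pos hc]
    exact findA_eq_some spec v _ (lowerB spec v i spec.length - i) i le_rfl h1 hc.1 hc.2
      (fun k hk1 hk2 => (h3 k hk1 hk2).ne)
  · rw [if_neg hc]
    apply findA_eq_none spec v (spec.length - i) i le_rfl
    intro k hk1 hk2
    by_cases hkr : k < lowerB spec v i spec.length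
    · exact (h3 k hk1 hkr).ne
    · have hr : lowerB spec v i spec.length < spec.length := by omega
      have hge : ¬ spec.getD (lowerB spec v i spec.length) 0 < v := h4 hr
      have hne : spec.getD (lowerB spec v i spec.length) 0 ≠ v := fun he => hc ⟨hr, he⟩
      have hgt : v < spec.getD (lowerB spec v i spec.length) 0 := by
        rcases lt_or_eq_of_le (not_lt.mp hge) with h | h
        · exact h
        · exact absurd h.symm hne
      exact fun he => absurd (lt_of_lt_of_le hgt (hmono _ k (by omega) hk2)) (by rw [he]; omega)

theorem fold_eq (spec : List Int)
    (hmono : ∀ p q : Nat, p ≤ q → q < spec.length → spec.getD p 0 ≤ spec.getD q 0) :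
    ∀ (sp : List Int) (s : Int) (i : Nat), i ≤ spec.length →
      (sp.foldl (fun (st : Int × Nat) x =>
          match findA spec x st.2 with
          | some y => (st.1 + 1, y + 1)
          | none => st) (s, i)).1
        = (sp.foldl (fun (st : Int × Nat) v =>
            let a := lowerB spec v st.2 spec.length
            if a < spec.length ∧ spec.getD a 0 = v then (st.1 + 1, a + 1) else st) (s, i)).1 := by
  intro sp
  induction sp with
  | nil => intro s i hi; rfl
  | cons v t ih =>
    intro s i hi
    simp only [List.foldl_cons]
    rw [step_eq spec v hmono i hi]
    by_cases hc : lowerB spec v i spec.length < spec.length ∧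
        spec.getD (lowerB spec v i spec.length) 0 = v
    · rw [if_pos hc]
      show (t.foldl _ (s + 1, lowerB spec v i spec.length + 1)).1 = _
      simp only [if_pos hc]
      exact ih (s + 1) (lowerB spec v i spec.length + 1) (by omega)
    · rw [if_neg hc]
      show (t.foldl _ (s, i)).1 = _
      simp only [if_neg hc]
      exact ih s i hi

-- ===== VERDICT (by name: the statement is the Claim_ definition above) =====
theorem cScore_spec : Claim_equal_cScore := by
  intro peptide spectrum _
  unfold Spec_cScore
  simp only [cScore, cScore_alt]
  rw [cycSpec_eq]
  apply fold_eq
  · intro p q hpq hq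
    rw [List.getD_eq_getElem _ _ (by omega), List.getD_eq_getElem _ _ hq]
    exact PySem.List.sorted_id_getElem_mono _ hpq hq
  · exact Nat.zero_le _
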